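-- pv_equiv track=rewrite | github.com/anders-wartoft/air-gap | utils/loadbalance.py | gen_filters
-- ===== SOURCE A (Python) =====
-- def gen_filters(pipes :int, redundancies :int):
--     assert pipes > 0
--     assert redundancies >= 0
--     assert redundancies < pipes
--     redundancys = (pipes-redundancies) % (pipes+1)
--     filters = [[] for _ in range(pipes)]
--     groups = []
--     for _ in range(3):
--         group_start = 0 if groups == [] else int(groups[-1][0])
--         groups = []
--
--         for i in range(group_start+1, group_start+pipes+1):
--             groups.append([i])
--
--         for group_depth in range(min(pipes - redundancys, pipes)):
--             for group_index, _ in enumerate(groups):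
--                 i = (group_index+group_depth+1) % (len(groups))
--                 add_group = groups[i]
--                 groups[group_index].append(add_group[0])
--         for i, _ in enumerate(filters):
--             filters[i] += groups[i]
--     return filters
-- ===== SOURCE B (Python) =====
-- def gen_filters(pipes: int, redundancies: int):
--     assert pipes > 0
--     assert redundancies >= 0
--     assert redundancies < pipes
--     def row(g):
--         out = []
--         for p in range(3):
--             offset = p * pipes
--             out += [offset + 1 + g]
--             out += [offset + 1 + (g + d + 1) % pipes for d in range(redundancies)]
--         return out
--     return [row(g) for g in range(pipes)]
-- ===== Notes on version B (the rewrite author's own statement) =====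
-- stated objective: simpler
-- what changed: B drops the intermediate groups structure and its rotation double-loop entirely and builds each filter row independently by the closed-form element (p*pipes+1+g, then p*pipes+1+(g+d+1)%pipes), output-driven instead of mutating shared group lists.
import Mathlib
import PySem

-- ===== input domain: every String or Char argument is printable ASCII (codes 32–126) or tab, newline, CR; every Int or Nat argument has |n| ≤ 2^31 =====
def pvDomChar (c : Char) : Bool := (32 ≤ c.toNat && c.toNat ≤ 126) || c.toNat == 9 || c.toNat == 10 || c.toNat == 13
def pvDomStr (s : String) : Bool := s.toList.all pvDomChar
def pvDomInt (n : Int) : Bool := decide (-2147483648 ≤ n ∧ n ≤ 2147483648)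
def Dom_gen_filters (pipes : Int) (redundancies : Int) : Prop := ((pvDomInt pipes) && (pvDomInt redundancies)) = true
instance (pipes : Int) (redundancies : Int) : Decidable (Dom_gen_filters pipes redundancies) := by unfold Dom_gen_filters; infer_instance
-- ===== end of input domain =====

-- B replaces A's mutated groups structure and rotation double-loop by building each
-- filter row independently from the closed-form element (p*pipes+1+g, then
-- p*pipes+1+(g+d+1)%pipes): simpler, output-driven decomposition, same cost.


-- ===== PORT A =====
-- Literal transliteration of A.  Python lists are mutable arrays, so the two
-- mutated lists (filters, groups) are Arrays (push = append, modify = in-place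
-- update); the three asserts are Pre_gen_filters (AssertionError outside it).
-- `enumerate(groups)` iterates indices 0..len-1 (the length never changes inside
-- the loop), ported as List.range gs.size; `int(x)` on an int is the identity;
-- `groups[-1][0]` reads the last element (groups is nonempty in that branch) and
-- `groups[i]` has 0 <= i < len (i is a % result with positive modulus), so plain
-- array indexing is exact there.
def gen_filters_pass (pipes redundancys : Int)
    (st : Array (Array Int) × Array (Array Int)) (_t : Int) :
    Array (Array Int) × Array (Array Int) :=
  let filters := st.1
  let groups := st.2
  let group_start : Int :=
    if groups.size = 0 then 0 else (groups.getD (groups.size - 1) #[]).getD 0 0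
  let groups := (PySem.List.pyRange (group_start + 1) (group_start + pipes + 1) 1).foldl
    (fun gs i => gs.push #[i]) #[]
  let groups := (PySem.List.pyRange 0 (min (pipes - redundancys) pipes) 1).foldl
    (fun gs group_depth =>
      (List.range gs.size).foldl (fun gs2 (group_index : Nat) =>
        let i := PySem.Int.mod ((group_index : Int) + group_depth + 1) (gs2.size : Int)
        let add_group := gs2.getD i.toNat #[]
        gs2.modify group_index (fun row => row.push (add_group.getD 0 0))) gs)
    groups
  let filters := (List.range filters.size).foldl
    (fun fs i => fs.modify i (fun row => row ++ groups.getD i #[])) filters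
  (filters, groups)

def gen_filters (pipes : Int) (redundancies : Int) : List (List Int) :=
  let redundancys := PySem.Int.mod (pipes - redundancies) (pipes + 1)
  let filters : Array (Array Int) :=
    ((PySem.List.pyRange 0 pipes 1).map (fun _ => (#[] : Array Int))).toArray
  (((PySem.List.pyRange 0 3 1).foldl (gen_filters_pass pipes redundancys)
      (filters, (#[] : Array (Array Int)))).1).toList.map Array.toList

-- ===== PORT B =====
-- Literal transliteration of B (Source B): each row built independently, closed form.
def gen_filters_alt (pipes : Int) (redundancies : Int) : List (List Int) :=
  (PySem.List.pyRange 0 pipes 1).map (fun g =>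
    (PySem.List.pyRange 0 3 1).foldl (fun out p =>
      let offset := p * pipes
      (out ++ [offset + 1 + g]) ++
        (PySem.List.pyRange 0 redundancies 1).map
          (fun d => offset + 1 + PySem.Int.mod (g + d + 1) pipes)) [])

-- ===== PRECONDITION & SPEC =====
-- Exactly A's three asserts: outside them A raises AssertionError.
def Pre_gen_filters (pipes : Int) (redundancies : Int) : Prop :=
  0 < pipes ∧ 0 ≤ redundancies ∧ redundancies < pipes
instance (pipes : Int) (redundancies : Int) : Decidable (Pre_gen_filters pipes redundancies) := by
  unfold Pre_gen_filters; infer_instance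
def pvWitness_gen_filters : Int × Int := (4, 2)

def Spec_gen_filters (pipes : Int) (redundancies : Int) (out : List (List Int)) : Prop := out = gen_filters_alt pipes redundancies
instance (pipes : Int) (redundancies : Int) (out : List (List Int)) : Decidable (Spec_gen_filters pipes redundancies out) := by unfold Spec_gen_filters; infer_instance

-- ===== CLAIM (what is proved, stated in full; the proofs are below) =====
def Claim_equal_gen_filters : Prop := ∀ (pipes : Int) (redundancies : Int), Dom_gen_filters pipes redundancies → Pre_gen_filters pipes redundancies → Spec_gen_filters pipes redundancies (gen_filters pipes redundancies)

-- ===== LEMMAS AND PROOFS =====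

-- the row contributed by one pass with offset s, after d depth steps (A) / d appends (B)
def pvRow (n s : Int) (d : Nat) (g : Nat) : List Int :=
  (s + 1 + (g : Int)) :: (List.range d).map (fun j : Nat => s + 1 + PySem.Int.mod ((g : Int) + (j : Int) + 1) n)

-- pvRowI: the same row with Int-typed group index (B's shape)
def pvRowI (n r s g : Int) : List Int :=
  (s + 1 + g) :: (List.range r.toNat).map (fun j : Nat => s + 1 + PySem.Int.mod (g + (j : Int) + 1) n)

-- the list-level mirror of gen_filters_pass (Array ops replaced by List ops)
def pvPassL (pipes redundancys : Int) (st : List (List Int) × List (List Int)) (_t : Int) :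
    List (List Int) × List (List Int) :=
  let filters := st.1
  let groups := st.2
  let group_start : Int :=
    if groups.length = 0 then 0 else (groups.getD (groups.length - 1) []).getD 0 0
  let groups := (PySem.List.pyRange (group_start + 1) (group_start + pipes + 1) 1).foldl
    (fun gs i => gs ++ [[i]]) []
  let groups := (PySem.List.pyRange 0 (min (pipes - redundancys) pipes) 1).foldl
    (fun gs group_depth =>
      (List.range gs.length).foldl (fun gs2 (group_index : Nat) =>
        let i := PySem.Int.mod ((group_index : Int) + group_depth + 1) (gs2.length : Int)
        let add_group := gs2.getD i.toNat []
        gs2.modify group_index (fun row => row ++ [add_group.getD 0 0])) gs)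
    groups
  let filters := (List.range filters.length).foldl
    (fun fs i => fs.modify i (fun row => row ++ groups.getD i [])) filters
  (filters, groups)

-- encoding of the list-level state as the port's array state
def pvE2 (l : List (List Int)) : Array (Array Int) := (l.map List.toArray).toArray

lemma pv_arr_eq {α : Type} (a b : Array α) (h : a.toList = b.toList) : a = b := by
  cases a; cases b; simpa using h

lemma pv_foldl_hom {α β γ : Type} (f : α → β) (g1 : α → γ → α) (g2 : β → γ → β)
    (l : List γ) (init : α) (H : ∀ x y, g2 (f x) y = f (g1 x y)) :
    l.foldl g2 (f init) = f (l.foldl g1 init) := by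
  induction l generalizing init with
  | nil => rfl
  | cons x xs ih => simp only [List.foldl_cons, H]; exact ih _

lemma pv_toList_toArray {α : Type} (l : List α) : l.toArray.toList = l := by simp

lemma pv_e2_size (l : List (List Int)) : (pvE2 l).size = l.length := by simp [pvE2]

lemma pv_getD_toList {α : Type} (a : Array α) (i : Nat) (d : α) :
    a.getD i d = a.toList.getD i d := by
  rw [Array.getD_eq_getD_getElem?, List.getD_eq_getElem?_getD]
  simp

lemma pv_e2_getD (l : List (List Int)) (i : Nat) :
    (pvE2 l).getD i #[] = (l.getD i []).toArray := by
  rw [pv_getD_toList]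
  simp only [pvE2, pv_toList_toArray]
  by_cases h : i < l.length
  · rw [List.getD_eq_getElem?_getD, List.getD_eq_getElem?_getD]
    simp [List.getElem?_map, List.getElem?_eq_getElem h]
  · rw [List.getD_eq_getElem?_getD, List.getD_eq_getElem?_getD]
    rw [List.getElem?_eq_none (by simpa using not_lt.mp h),
        List.getElem?_eq_none (by exact not_lt.mp h)]
    rfl

lemma pv_map_modify {α β : Type} (g : α → β) (fL : α → α) (fB : β → β) (l : List α) (i : Nat)
    (h : ∀ x, g (fL x) = fB (g x)) :
    (l.modify i fL).map g = (l.map g).modify i fB := by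
  apply List.ext_getElem
  · simp [List.length_modify]
  · intro j h1 h2
    simp only [List.getElem_map, List.getElem_modify]
    by_cases hij : i = j <;> simp [hij, h]

lemma pv_e2_modify_append (l : List (List Int)) (i : Nat) (v : Int) :
    (pvE2 l).modify i (fun row => row.push v) = pvE2 (l.modify i (fun row => row ++ [v])) := by
  apply pv_arr_eq
  rw [Array.toList_modify]
  simp only [pvE2, pv_toList_toArray]
  exact (pv_map_modify List.toArray (fun row => row ++ [v]) (fun row => row.push v) l i
    (fun x => (List.push_toArray x v).symm)).symm

lemma pv_e2_modify_extend (l : List (List Int)) (i : Nat) (v : List Int) :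
    (pvE2 l).modify i (fun row => row ++ v.toArray) = pvE2 (l.modify i (fun row => row ++ v)) := by
  apply pv_arr_eq
  rw [Array.toList_modify]
  simp only [pvE2, pv_toList_toArray]
  exact (pv_map_modify List.toArray (fun row => row ++ v) (fun row => row ++ v.toArray) l i
    (fun x => by apply pv_arr_eq; simp)).symm

-- one pass of the array port equals the encoded list-level pass
lemma pv_pass_comm (p rd : Int) (st : List (List Int) × List (List Int)) (t : Int) :
    gen_filters_pass p rd (pvE2 st.1, pvE2 st.2) t
      = (pvE2 (pvPassL p rd st t).1, pvE2 (pvPassL p rd st t).2) := by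
  obtain ⟨fl, gl⟩ := st
  unfold gen_filters_pass pvPassL
  simp only []
  have hstart :
      (if (pvE2 gl).size = 0 then (0 : Int)
       else ((pvE2 gl).getD ((pvE2 gl).size - 1) #[]).getD 0 0)
      = (if gl.length = 0 then (0 : Int)
         else (gl.getD (gl.length - 1) []).getD 0 0) := by
    rw [pv_e2_size]
    split_ifs with h
    · rfl
    · rw [pv_e2_getD, pv_getD_toList]
  rw [hstart]
  set s := (if gl.length = 0 then (0 : Int) else (gl.getD (gl.length - 1) []).getD 0 0)
  have hbuild :
      (PySem.List.pyRange (s + 1) (s + p + 1) 1).foldl (fun gs i => gs.push #[i]) #[]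
      = pvE2 ((PySem.List.pyRange (s + 1) (s + p + 1) 1).foldl (fun gs i => gs ++ [[i]]) []) := by
    have h0 : (#[] : Array (Array Int)) = pvE2 [] := rfl
    rw [h0]
    refine pv_foldl_hom pvE2 _ _ _ _ ?_
    intro x y
    apply pv_arr_eq
    simp only [Array.toList_push, pvE2, pv_toList_toArray, List.map_append, List.map_cons,
      List.map_nil]
  rw [hbuild]
  have hdepth : ∀ (gs : List (List Int)),
      (PySem.List.pyRange 0 (min (p - rd) p) 1).foldl
        (fun gsA group_depth =>
          (List.range gsA.size).foldl (fun gs2 (group_index : Nat) =>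
            let i := PySem.Int.mod ((group_index : Int) + group_depth + 1) (gs2.size : Int)
            let add_group := gs2.getD i.toNat #[]
            gs2.modify group_index (fun row => row.push (add_group.getD 0 0))) gsA)
        (pvE2 gs)
      = pvE2 ((PySem.List.pyRange 0 (min (p - rd) p) 1).foldl
          (fun gsL group_depth =>
            (List.range gsL.length).foldl (fun gs2 (group_index : Nat) =>
              let i := PySem.Int.mod ((group_index : Int) + group_depth + 1) (gs2.length : Int)
              let add_group := gs2.getD i.toNat []
              gs2.modify group_index (fun row => row ++ [add_group.getD 0 0])) gsL)
          gs) := by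
    intro gs
    refine pv_foldl_hom pvE2 _ _ _ _ ?_
    intro x gd
    rw [pv_e2_size]
    refine pv_foldl_hom pvE2 _ _ _ _ ?_
    intro x2 gi
    simp only []
    rw [pv_e2_size, pv_e2_getD, pv_getD_toList]
    exact pv_e2_modify_append _ _ _
  rw [hdepth]
  set gs2 := ((PySem.List.pyRange 0 (min (p - rd) p) 1).foldl _ _)
  have hfil :
      (List.range (pvE2 fl).size).foldl
        (fun fs i => fs.modify i (fun row => row ++ (pvE2 gs2).getD i #[])) (pvE2 fl)
      = pvE2 ((List.range fl.length).foldl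
          (fun fs i => fs.modify i (fun row => row ++ gs2.getD i [])) fl) := by
    rw [pv_e2_size]
    refine pv_foldl_hom pvE2 _ _ _ _ ?_
    intro x i
    rw [pv_e2_getD]
    exact pv_e2_modify_extend _ _ _
  rw [hfil]

lemma pv_gen_filters_eq (pipes redundancies : Int) :
    gen_filters pipes redundancies
      = ((PySem.List.pyRange 0 3 1).foldl
          (pvPassL pipes (PySem.Int.mod (pipes - redundancies) (pipes + 1)))
          ((PySem.List.pyRange 0 pipes 1).map (fun _ => []), ([] : List (List Int)))).1 := by
  simp only [gen_filters]
  have hinit : ((PySem.List.pyRange 0 pipes 1).map (fun _ => (#[] : Array Int))).toArray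
      = pvE2 ((PySem.List.pyRange 0 pipes 1).map (fun _ => [])) := by
    apply pv_arr_eq
    simp [pvE2, List.map_map, Function.comp_def]
  have h0 : (#[] : Array (Array Int)) = pvE2 [] := rfl
  rw [hinit, h0]
  have hfold := pv_foldl_hom
      (f := fun st : List (List Int) × List (List Int) => (pvE2 st.1, pvE2 st.2))
      (g1 := pvPassL pipes (PySem.Int.mod (pipes - redundancies) (pipes + 1)))
      (g2 := gen_filters_pass pipes (PySem.Int.mod (pipes - redundancies) (pipes + 1)))
      (l := PySem.List.pyRange 0 3 1)
      (init := ((PySem.List.pyRange 0 pipes 1).map (fun _ => []), ([] : List (List Int))))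
      (fun st t => pv_pass_comm _ _ st t)
  simp only [] at hfold
  rw [hfold]
  simp [pvE2, List.map_map, Function.comp_def]

lemma pv_foldl_append_map {α β : Type} (l : List α) (f : α → List β) (init : List β) :
    l.foldl (fun acc x => acc ++ f x) init = init ++ l.flatMap f := by
  induction l generalizing init with
  | nil => simp
  | cons x xs ih => simp [ih, List.flatMap_cons, List.append_assoc]

lemma pv_flatMap_singleton {α β : Type} (f : α → β) (l : List α) :
    l.flatMap (fun x => [f x]) = l.map f := by
  induction l with
  | nil => rfl
  | cons x xs ih => simp [ih]

lemma pv_getD_map_range {α : Type} (N k : Nat) (F : Nat → α) (d : α) (hk : k < N) :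
    ((List.range N).map F).getD k d = F k := by
  rw [List.getD_eq_getElem?_getD]
  simp [hk]

lemma pv_modify_map_range {α : Type} (N k : Nat) (F : Nat → α) (f : α → α) :
    ((List.range N).map F).modify k f
      = (List.range N).map (fun g => if g = k then f (F g) else F g) := by
  apply List.ext_getElem
  · simp [List.length_modify]
  · intro i h1 h2
    simp only [List.getElem_modify, List.getElem_map, List.getElem_range]
    by_cases hik : k = i
    · simp [hik]
    · rw [if_neg hik, if_neg (fun h : i = k => hik h.symm)]

-- generic loop: for k in range(N): xs[k] = xs[k] + v(xs, k)
lemma pv_foldl_modify_range (N : Nat) (G W : Nat → List Int) (v : List (List Int) → Nat → List Int)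
    (hv : ∀ k, k < N →
      v ((List.range N).map (fun g => if g < k then G g ++ W g else G g)) k = W k) :
    (List.range N).foldl (fun gs gi => gs.modify gi (fun row => row ++ v gs gi))
      ((List.range N).map G)
      = (List.range N).map (fun g => G g ++ W g) := by
  suffices h : ∀ m k, k + m = N →
      (List.range' k m).foldl (fun gs gi => gs.modify gi (fun row => row ++ v gs gi))
        ((List.range N).map (fun g => if g < k then G g ++ W g else G g))
      = (List.range N).map (fun g => G g ++ W g) by
    have h0 := h N 0 (by omega)
    simpa [List.range_eq_range'] using h0
  intro m
  induction m with
  | zero =>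
    intro k hk
    subst hk
    simp only [List.range', List.foldl_nil]
    apply List.map_congr_left
    intro g hg
    simp at hg
    simp [hg]
  | succ m ih =>
    intro k hk
    have hkN : k < N := by omega
    rw [List.range'_succ, List.foldl_cons, hv k hkN, pv_modify_map_range]
    have hmap : (List.range N).map (fun g => if g = k
          then (if g < k then G g ++ W g else G g) ++ W k
          else if g < k then G g ++ W g else G g)
        = (List.range N).map (fun g => if g < k + 1 then G g ++ W g else G g) := by
      apply List.map_congr_left
      intro g hg
      by_cases h1 : g = k
      · simp [h1]
      · by_cases h2 : g < k <;> simp [h1, h2] <;> omega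
    rw [hmap]
    exact ih (k + 1) (by omega)

-- one depth step of A's rotation loop
lemma pv_depth_step (n : Int) (hn : 0 < n) (s : Int) (d : Int) (hd : 0 ≤ d) :
    (List.range (((List.range n.toNat).map (pvRow n s d.toNat)).length)).foldl
      (fun gs2 (group_index : Nat) =>
        gs2.modify group_index (fun row => row ++
          [(gs2.getD (PySem.Int.mod ((group_index : Int) + d + 1) (gs2.length : Int)).toNat []).getD 0 0]))
      ((List.range n.toNat).map (pvRow n s d.toNat))
      = (List.range n.toNat).map (pvRow n s (d.toNat + 1)) := by
  have hN : ((n.toNat : Int)) = n := Int.toNat_of_nonneg hn.le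
  rw [List.length_map, List.length_range]
  have key := pv_foldl_modify_range n.toNat (pvRow n s d.toNat)
      (fun g => [s + 1 + PySem.Int.mod ((g : Int) + d + 1) n])
      (fun gs2 k =>
        [(gs2.getD (PySem.Int.mod ((k : Int) + d + 1) (gs2.length : Int)).toNat []).getD 0 0])
      (by
        intro k hk
        simp only [List.length_map, List.length_range, hN]
        have hemod : PySem.Int.mod ((k : Int) + d + 1) n = ((k : Int) + d + 1) % n :=
          PySem.Int.mod_eq_emod_of_pos hn
        have h0 : 0 ≤ PySem.Int.mod ((k : Int) + d + 1) n := by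
          rw [hemod]; exact Int.emod_nonneg _ (by omega)
        have h1 : PySem.Int.mod ((k : Int) + d + 1) n < n := by
          rw [hemod]; exact Int.emod_lt_of_pos _ hn
        set i := PySem.Int.mod ((k : Int) + d + 1) n with hidef
        have hlt : i.toNat < n.toNat := by omega
        have hcast : ((i.toNat : Int)) = i := Int.toNat_of_nonneg h0
        rw [pv_getD_map_range _ _ _ _ hlt]
        by_cases hik : i.toNat < k
        · simp only [hik, if_true, pvRow, List.cons_append, List.getD_cons_zero]
          rw [hcast]
        · simp only [hik, if_false, pvRow, List.getD_cons_zero]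
          rw [hcast])
  rw [key]
  apply List.map_congr_left
  intro g hg
  simp [pvRow, List.range_succ, Int.toNat_of_nonneg hd]

-- A's depth loop, fully unrolled over range(r)
lemma pv_depth_fold (n : Int) (hn : 0 < n) (s : Int) (R : Nat) :
    (PySem.List.pyRange 0 (R : Int) 1).foldl
      (fun gs group_depth =>
        (List.range gs.length).foldl (fun gs2 (group_index : Nat) =>
          gs2.modify group_index (fun row => row ++
            [(gs2.getD (PySem.Int.mod ((group_index : Int) + group_depth + 1) (gs2.length : Int)).toNat []).getD 0 0]))
          gs)
      ((List.range n.toNat).map (pvRow n s 0))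
      = (List.range n.toNat).map (pvRow n s R) := by
  induction R with
  | zero => simp [PySem.List.pyRange_one_eq_nil]
  | succ R ih =>
    have hsplit : PySem.List.pyRange 0 ((R : Int) + 1) 1
        = PySem.List.pyRange 0 (R : Int) 1 ++ [(R : Int)] :=
      PySem.List.pyRange_one_succ_right (by positivity)
    have hcast : (((R : Nat) + 1 : Nat) : Int) = (R : Int) + 1 := by push_cast; ring
    rw [hcast, hsplit, List.foldl_append, ih, List.foldl_cons, List.foldl_nil]
    have := pv_depth_step n hn s (R : Int) (by positivity)
    simpa using this

-- the groups list built by one pass (singletons), before the depth loop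
lemma pv_build_groups (n : Int) (hn : 0 < n) (s : Int) :
    (PySem.List.pyRange (s + 1) (s + n + 1) 1).foldl (fun gs i => gs ++ [[i]]) []
      = (List.range n.toNat).map (pvRow n s 0) := by
  rw [pv_foldl_append_map]
  have h1 : s + n + 1 - (s + 1) = n := by ring
  rw [PySem.List.pyRange_one, h1, List.flatMap_map, pv_flatMap_singleton]
  simp only [List.nil_append]
  apply List.map_congr_left
  intro g hg
  simp [pvRow]

-- group_start read from the previous pass's groups
lemma pv_group_start (n : Int) (hn : 0 < n) (s : Int) (R : Nat) :
    (if ((List.range n.toNat).map (pvRow n s R)).length = 0 then (0 : Int)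
     else (((List.range n.toNat).map (pvRow n s R)).getD
       (((List.range n.toNat).map (pvRow n s R)).length - 1) []).getD 0 0)
      = s + n := by
  have hN : 0 < n.toNat := by omega
  rw [List.length_map, List.length_range, if_neg (by omega)]
  rw [pv_getD_map_range _ _ _ _ (by omega)]
  simp only [pvRow, List.getD_cons_zero]
  have : ((n.toNat - 1 : Nat) : Int) = n - 1 := by omega
  rw [this]; ring

-- one full pass of A (list level), under the precondition
lemma pv_pass_eval (n r : Int) (hn : 0 < n) (h0 : 0 ≤ r) (h1 : r < n)
    (F : Nat → List Int) (groups : List (List Int)) (s : Int)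
    (hgs : (if groups.length = 0 then (0 : Int)
            else (groups.getD (groups.length - 1) []).getD 0 0) = s)
    (t : Int) :
    pvPassL n (PySem.Int.mod (n - r) (n + 1)) ((List.range n.toNat).map F, groups) t
      = ((List.range n.toNat).map (fun g => F g ++ pvRow n s r.toNat g),
         (List.range n.toNat).map (pvRow n s r.toNat)) := by
  have hred : PySem.Int.mod (n - r) (n + 1) = n - r := by
    rw [PySem.Int.mod_eq_emod_of_pos (by omega)]
    exact Int.emod_eq_of_lt (by omega) (by omega)
  have hmin : min (n - PySem.Int.mod (n - r) (n + 1)) n = ((r.toNat : Nat) : Int) := by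
    rw [hred]
    have : ((r.toNat : Int)) = r := Int.toNat_of_nonneg h0
    omega
  unfold pvPassL
  simp only [hgs, hmin]
  rw [pv_build_groups n hn s, pv_depth_fold n hn s r.toNat]
  have hfil : (List.range (((List.range n.toNat).map F).length)).foldl
      (fun fs i => fs.modify i (fun row => row ++
        ((List.range n.toNat).map (pvRow n s r.toNat)).getD i [])) ((List.range n.toNat).map F)
      = (List.range n.toNat).map (fun g => F g ++ pvRow n s r.toNat g) := by
    rw [List.length_map, List.length_range]
    exact pv_foldl_modify_range n.toNat F (pvRow n s r.toNat)
      (fun _ i => ((List.range n.toNat).map (pvRow n s r.toNat)).getD i [])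
      (fun k hk => pv_getD_map_range n.toNat k _ [] hk)
  rw [hfil]

-- B's row equals the three concatenated pass rows
lemma pv_row_alt (n r : Int) (g : Int) :
    (PySem.List.pyRange 0 3 1).foldl (fun out p =>
      let offset := p * n
      (out ++ [offset + 1 + g]) ++
        (PySem.List.pyRange 0 r 1).map
          (fun d => offset + 1 + PySem.Int.mod (g + d + 1) n)) []
      = pvRowI n r 0 g ++ pvRowI n r n g ++ pvRowI n r (2 * n) g := by
  have h3 : PySem.List.pyRange 0 3 1 = [0, 1, 2] := by decide
  have hmap : ∀ s : Int, (PySem.List.pyRange 0 r 1).map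
      (fun d => s + 1 + PySem.Int.mod (g + d + 1) n)
      = (List.range r.toNat).map (fun j : Nat => s + 1 + PySem.Int.mod (g + (j : Int) + 1) n) := by
    intro s
    rw [PySem.List.pyRange_one]
    simp only [Int.sub_zero, List.map_map]
    apply List.map_congr_left
    intro j hj
    simp
  rw [h3]
  simp only [List.foldl_cons, List.foldl_nil]
  simp only [hmap]
  simp [pvRowI, zero_mul, one_mul, zero_add, List.append_assoc]

lemma pv_row_alt' (n r : Int) :
    (fun g => (PySem.List.pyRange 0 3 1).foldl (fun out p =>
      let offset := p * n
      (out ++ [offset + 1 + g]) ++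
        (PySem.List.pyRange 0 r 1).map
          (fun d => offset + 1 + PySem.Int.mod (g + d + 1) n)) [])
      = fun g => pvRowI n r 0 g ++ pvRowI n r n g ++ pvRowI n r (2 * n) g :=
  funext (pv_row_alt n r)

lemma pv_rowI_cast (n r s : Int) (g : Nat) :
    pvRowI n r s ((g : Nat) : Int) = pvRow n s r.toNat g := rfl

-- ===== VERDICT (by name: the statement is the Claim_ definition above) =====
theorem gen_filters_spec : Claim_equal_gen_filters := by
  intro pipes redundancies hdom hpre
  obtain ⟨hn, h0, h1⟩ := hpre
  unfold Spec_gen_filters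
  rw [pv_gen_filters_eq]
  have h3 : PySem.List.pyRange 0 3 1 = [0, 1, 2] := by decide
  have hfil0 : (PySem.List.pyRange 0 pipes 1).map (fun _ => ([] : List Int))
      = (List.range pipes.toNat).map (fun _ => ([] : List Int)) := by
    rw [PySem.List.pyRange_one]
    simp only [Int.sub_zero, List.map_map]
    apply List.map_congr_left
    intro _ _
    rfl
  rw [h3, hfil0, List.foldl_cons,
      pv_pass_eval pipes redundancies hn h0 h1 _ [] 0 (by simp) 0,
      List.foldl_cons,
      pv_pass_eval pipes redundancies hn h0 h1 _
        ((List.range pipes.toNat).map (pvRow pipes 0 redundancies.toNat)) pipes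
        (by rw [pv_group_start pipes hn 0 redundancies.toNat]; ring) 1,
      List.foldl_cons,
      pv_pass_eval pipes redundancies hn h0 h1 _
        ((List.range pipes.toNat).map (pvRow pipes pipes redundancies.toNat)) (2 * pipes)
        (by rw [pv_group_start pipes hn pipes redundancies.toNat]; ring) 2,
      List.foldl_nil]
  unfold gen_filters_alt
  rw [pv_row_alt', PySem.List.pyRange_one 0 pipes]
  simp only [Int.sub_zero, List.map_map]
  apply List.map_congr_left
  intro g hg
  simp only [Function.comp_apply, zero_add, List.nil_append]
  rw [pv_rowI_cast, pv_rowI_cast, pv_rowI_cast]
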